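-- pv_equiv track=rewrite | github.com/Gaomengkai/bgmner_v2 | src/bgmner_bert/inference_utils.py | token_ids_to_word_tags
-- ===== SOURCE A (Python) =====
-- from typing import Dict, List, Sequence, Tuple
--
-- def token_ids_to_word_tags(
--     token_label_ids: Sequence[int], word_ids: Sequence[int], id2label: Dict[int, str]
-- ) -> List[str]:
--     max_word_id = max((wid for wid in word_ids if wid >= 0), default=-1)
--     if max_word_id < 0:
--         return []
--
--     word_tags = ["O"] * (max_word_id + 1)
--     seen_words = set()
--     for token_index, word_id in enumerate(word_ids):
--         if word_id < 0 or word_id in seen_words: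
--             continue
--         if token_index >= len(token_label_ids):
--             break
--         seen_words.add(word_id)
--         word_tags[word_id] = id2label.get(int(token_label_ids[token_index]), "O")
--     return word_tags
-- ===== SOURCE B (Python) =====
-- def token_ids_to_word_tags(token_label_ids, word_ids, id2label):
--     max_word_id = max((wid for wid in word_ids if wid >= 0), default=-1)
--     if max_word_id < 0:
--         return []
--     word_tags = ["O"] * (max_word_id + 1)
--     # Walk the (word_id, label_id) pairs BACKWARDS and write unconditionally:
--     # earlier pairs overwrite later ones, so the first occurrence of each word
--     # wins without any seen-set bookkeeping; zip truncates at len(token_label_ids).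
--     for word_id, label_id in reversed(list(zip(word_ids, token_label_ids))):
--         if word_id >= 0:
--             word_tags[word_id] = id2label.get(int(label_id), "O")
--     return word_tags
-- ===== Notes on version B (the rewrite author's own statement) =====
-- stated objective: simpler
-- what changed: Replaces the forward pass with a seen_words set and an index/break by a single reverse pass over zip(word_ids, token_label_ids) that writes unconditionally, so the first occurrence of each word wins by overwriting and the seen set and index bookkeeping disappear.
import Mathlib
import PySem

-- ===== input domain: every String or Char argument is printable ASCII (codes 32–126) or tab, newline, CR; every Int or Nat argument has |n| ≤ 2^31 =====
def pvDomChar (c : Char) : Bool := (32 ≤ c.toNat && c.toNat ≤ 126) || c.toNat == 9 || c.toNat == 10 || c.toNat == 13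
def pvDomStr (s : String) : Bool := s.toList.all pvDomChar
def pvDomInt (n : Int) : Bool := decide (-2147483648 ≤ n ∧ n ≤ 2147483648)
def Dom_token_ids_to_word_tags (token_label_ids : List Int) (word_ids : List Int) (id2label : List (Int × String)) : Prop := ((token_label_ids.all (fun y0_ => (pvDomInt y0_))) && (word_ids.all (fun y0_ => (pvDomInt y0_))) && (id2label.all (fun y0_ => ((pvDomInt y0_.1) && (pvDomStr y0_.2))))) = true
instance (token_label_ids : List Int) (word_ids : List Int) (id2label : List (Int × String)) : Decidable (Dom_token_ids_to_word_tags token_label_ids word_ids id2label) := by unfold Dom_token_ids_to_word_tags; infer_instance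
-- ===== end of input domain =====

-- B replaces A's forward pass with a seen-set and index/break by one reverse pass over
-- zip(word_ids, token_label_ids) that writes unconditionally (first occurrence wins by
-- overwriting); objective: simpler.

-- ===== PORT A =====
-- max((wid for wid in word_ids if wid >= 0), default=-1): running max over the filtered
-- list starting from -1 (exact: every kept element is ≥ 0 > -1).
def pvMaxWid (word_ids : List Int) : Int :=
  (word_ids.filter (fun wid => decide (0 ≤ wid))).foldl max (-1)

-- the for-loop of A: enumerate(word_ids) with token index i, seen set, break on i ≥ len.
-- token_label_ids.getD i 0 is exact for token_label_ids[i]: the branch guarantees i < length.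
def pvLoopA (token_label_ids : List Int) (id2label : List (Int × String)) :
    List Int → Nat → List String → PySem.Set Int → List String
  | [], _, tags, _ => tags
  | wid :: rest, i, tags, seen =>
    if wid < 0 ∨ PySem.Set.contains seen wid = true then
      pvLoopA token_label_ids id2label rest (i + 1) tags seen
    else if token_label_ids.length ≤ i then tags
    else
      pvLoopA token_label_ids id2label rest (i + 1)
        (PySem.List.pySetD tags wid (PySem.Dict.getD ⟨id2label⟩ (token_label_ids.getD i 0) "O"))
        (PySem.Set.add seen wid)

def token_ids_to_word_tags (token_label_ids : List Int) (word_ids : List Int) (id2label : List (Int × String)) : List String :=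
  let max_word_id := pvMaxWid word_ids
  if max_word_id < 0 then []
  else
    pvLoopA token_label_ids id2label word_ids 0
      (List.replicate (max_word_id + 1).toNat "O") PySem.Set.empty

-- ===== PORT B =====
def token_ids_to_word_tags_alt (token_label_ids : List Int) (word_ids : List Int) (id2label : List (Int × String)) : List String :=
  let max_word_id := pvMaxWid word_ids
  if max_word_id < 0 then []
  else
    ((word_ids.zip token_label_ids).reverse).foldl
      (fun tags p =>
        if 0 ≤ p.1 then
          PySem.List.pySetD tags p.1 (PySem.Dict.getD ⟨id2label⟩ p.2 "O")
        else tags)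
      (List.replicate (max_word_id + 1).toNat "O")

-- ===== PRECONDITION & SPEC =====
def Spec_token_ids_to_word_tags (token_label_ids : List Int) (word_ids : List Int) (id2label : List (Int × String)) (out : List String) : Prop := out = token_ids_to_word_tags_alt token_label_ids word_ids id2label
instance (token_label_ids : List Int) (word_ids : List Int) (id2label : List (Int × String)) (out : List String) : Decidable (Spec_token_ids_to_word_tags token_label_ids word_ids id2label out) := by unfold Spec_token_ids_to_word_tags; infer_instance

-- ===== CLAIM (what is proved, stated in full; the proofs are below) =====
def Claim_equal_token_ids_to_word_tags : Prop := ∀ (token_label_ids : List Int) (word_ids : List Int) (id2label : List (Int × String)), Dom_token_ids_to_word_tags token_label_ids word_ids id2label → Spec_token_ids_to_word_tags token_label_ids word_ids id2label (token_ids_to_word_tags token_label_ids word_ids id2label)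

-- ===== LEMMAS AND PROOFS =====

-- proof-side: A's loop rephrased over (word_id, label) pairs (index and break already resolved)
def pvFwd (id2l : List (Int × String)) : List (Int × Int) → List String → PySem.Set Int → List String
  | [], tags, _ => tags
  | (w, l) :: rest, tags, seen =>
    if w < 0 ∨ PySem.Set.contains seen w = true then pvFwd id2l rest tags seen
    else pvFwd id2l rest (PySem.List.pySetD tags w (PySem.Dict.getD ⟨id2l⟩ l "O")) (PySem.Set.add seen w)

-- proof-side: the label written at word j = label of the FIRST pair whose word_id is j
def pvFirst (pairs : List (Int × Int)) (j : Nat) : Option Int :=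
  (pairs.find? (fun p => p.1 == (j : Int))).map (·.2)

-- unfolding pvFirst on a cons cell
theorem pvFirst_cons (w l : Int) (rest : List (Int × Int)) (j : Nat) :
    pvFirst ((w, l) :: rest) j = if w = (j : Int) then some l else pvFirst rest j := by
  by_cases hw : w = (j : Int)
  · simp [pvFirst, hw]
  · simp [pvFirst, hw]

-- A's loop equals the pair-level forward pass
theorem pvLoopA_eq_pvFwd (tli : List Int) (id2l : List (Int × String)) :
    ∀ (wids : List Int) (i : Nat) (tags : List String) (seen : PySem.Set Int),
      pvLoopA tli id2l wids i tags seen = pvFwd id2l (wids.zip (tli.drop i)) tags seen := by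
  intro wids
  induction wids with
  | nil => intro i tags seen; simp [pvLoopA, pvFwd]
  | cons w rest ih =>
    intro i tags seen
    by_cases hi : i < tli.length
    · have hdrop : tli.drop i = tli[i] :: tli.drop (i + 1) := (List.getElem_cons_drop hi).symm
      rw [hdrop]
      by_cases hc : w < 0 ∨ PySem.Set.contains seen w = true
      · simp only [pvLoopA, List.zip_cons_cons, pvFwd, if_pos hc]; exact ih (i + 1) tags seen
      · simp only [pvLoopA, List.zip_cons_cons, pvFwd, if_neg hc, if_neg (by omega : ¬ tli.length ≤ i),
          List.getD_eq_getElem tli 0 hi]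
        exact ih (i + 1) _ _
    · rw [List.drop_eq_nil_of_le (by omega), List.zip_nil_right]
      by_cases hc : w < 0 ∨ PySem.Set.contains seen w = true
      · simp only [pvLoopA, if_pos hc, pvFwd]
        rw [ih (i + 1) tags seen, List.drop_eq_nil_of_le (by omega), List.zip_nil_right]
        simp [pvFwd]
      · simp only [pvLoopA, if_neg hc, if_pos (by omega : tli.length ≤ i), pvFwd]

theorem pvFwd_length (id2l : List (Int × String)) :
    ∀ (pairs : List (Int × Int)) (tags : List String) (seen : PySem.Set Int),
      (pvFwd id2l pairs tags seen).length = tags.length := by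
  intro pairs
  induction pairs with
  | nil => intro tags seen; simp [pvFwd]
  | cons p rest ih =>
    intro tags seen
    obtain ⟨w, l⟩ := p
    by_cases hc : w < 0 ∨ PySem.Set.contains seen w = true
    · simp only [pvFwd, if_pos hc]; exact ih tags seen
    · simp only [pvFwd, if_neg hc]; rw [ih, PySem.List.length_pySetD]

theorem pvRun_length (id2l : List (Int × String)) :
    ∀ (pairs : List (Int × Int)) (tags : List String),
      (pairs.foldr (fun p t => if 0 ≤ p.1 then PySem.List.pySetD t p.1 (PySem.Dict.getD ⟨id2l⟩ p.2 "O") else t) tags).length = tags.length := by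
  intro pairs
  induction pairs with
  | nil => intro tags; rfl
  | cons p rest ih =>
    intro tags
    simp only [List.foldr_cons]
    split
    · rw [PySem.List.length_pySetD, ih]
    · exact ih tags

-- the reverse (foldr) pass, elementwise: the first matching pair wins
theorem pvRun_getD (id2l : List (Int × String)) :
    ∀ (pairs : List (Int × Int)) (tags : List String) (j : Nat), j < tags.length →
      (pairs.foldr (fun p t => if 0 ≤ p.1 then PySem.List.pySetD t p.1 (PySem.Dict.getD ⟨id2l⟩ p.2 "O") else t) tags).getD j "O" =
        match pvFirst pairs j with
        | some l => PySem.Dict.getD ⟨id2l⟩ l "O"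
        | none => tags.getD j "O" := by
  intro pairs
  induction pairs with
  | nil => intro tags j hj; rfl
  | cons p rest ih =>
    intro tags j hj
    obtain ⟨w, l⟩ := p
    simp only [List.foldr_cons]
    by_cases hw : w = (j : Int)
    · have h0 : (0 : Int) ≤ w := by omega
      rw [if_pos h0, PySem.List.pySetD_of_nonneg _ _ h0]
      have hwj : w.toNat = j := by omega
      have hjlen : j < (rest.foldr (fun p t => if 0 ≤ p.1 then PySem.List.pySetD t p.1 (PySem.Dict.getD ⟨id2l⟩ p.2 "O") else t) tags).length := by
        rw [pvRun_length]; exact hj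
      rw [hwj]
      rw [pvFirst_cons, if_pos hw]
      simp [List.getD_eq_getElem?_getD, hjlen]
    · have hstep : (if 0 ≤ w then PySem.List.pySetD (rest.foldr (fun p t => if 0 ≤ p.1 then PySem.List.pySetD t p.1 (PySem.Dict.getD ⟨id2l⟩ p.2 "O") else t) tags) w (PySem.Dict.getD ⟨id2l⟩ l "O") else rest.foldr (fun p t => if 0 ≤ p.1 then PySem.List.pySetD t p.1 (PySem.Dict.getD ⟨id2l⟩ p.2 "O") else t) tags).getD j "O" = (rest.foldr (fun p t => if 0 ≤ p.1 then PySem.List.pySetD t p.1 (PySem.Dict.getD ⟨id2l⟩ p.2 "O") else t) tags).getD j "O" := by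
        split
        · next h0 =>
            rw [PySem.List.pySetD_of_nonneg _ _ h0]
            have hne : w.toNat ≠ j := by omega
            simp [List.getD_eq_getElem?_getD, List.getElem?_set_ne hne]
        · rfl
      rw [hstep, ih tags j hj]
      rw [pvFirst_cons, if_neg hw]

-- the forward pass with a seen set, elementwise
theorem pvFwd_getD (id2l : List (Int × String)) :
    ∀ (pairs : List (Int × Int)) (tags : List String) (seen : PySem.Set Int) (j : Nat),
      j < tags.length → (∀ p ∈ pairs, 0 ≤ p.1 → p.1 < (tags.length : Int)) →
      (pvFwd id2l pairs tags seen).getD j "O" =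
        if (j : Int) ∈ seen then tags.getD j "O"
        else
          match pvFirst pairs j with
          | some l => PySem.Dict.getD ⟨id2l⟩ l "O"
          | none => tags.getD j "O" := by
  intro pairs
  induction pairs with
  | nil =>
    intro tags seen j hj _
    simp only [pvFwd, pvFirst, List.find?_nil, Option.map_none]
    split <;> rfl
  | cons p rest ih =>
    intro tags seen j hj hb
    obtain ⟨w, l⟩ := p
    have hbrest : ∀ q ∈ rest, 0 ≤ q.1 → q.1 < (tags.length : Int) := by
      intro q hq; exact hb q (List.mem_cons_of_mem _ hq)
    by_cases hc : w < 0 ∨ PySem.Set.contains seen w = true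
    · simp only [pvFwd, if_pos hc]
      rw [ih tags seen j hj hbrest]
      by_cases hjs : (j : Int) ∈ seen
      · rw [if_pos hjs, if_pos hjs]
      · rw [if_neg hjs, if_neg hjs]
        have hne : w ≠ (j : Int) := by
          rcases hc with hneg | hcontains
          · omega
          · intro he; exact hjs (he ▸ (PySem.Set.contains_iff seen w).1 hcontains)
        rw [pvFirst_cons, if_neg hne]
    · have h0 : (0 : Int) ≤ w := by
        by_contra h; exact hc (Or.inl (by omega))
      have hwseen : w ∉ seen := fun hmem => hc (Or.inr ((PySem.Set.contains_iff seen w).2 hmem))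
      simp only [pvFwd, if_neg hc]
      have hlenset : (PySem.List.pySetD tags w (PySem.Dict.getD ⟨id2l⟩ l "O")).length = tags.length := PySem.List.length_pySetD _ _ _
      rw [ih _ (PySem.Set.add seen w) j (by rw [hlenset]; exact hj) (by rw [hlenset]; exact hbrest)]
      rw [PySem.List.pySetD_of_nonneg _ _ h0]
      by_cases hjs : (j : Int) ∈ seen
      · have hne : w.toNat ≠ j := by
          intro he
          have hwj : w = (j : Int) := by omega
          exact hwseen (by rw [hwj]; exact hjs)
        have hjadd : (j : Int) ∈ PySem.Set.add seen w := (PySem.Set.mem_add _ _ _).2 (Or.inl hjs)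
        rw [if_pos hjadd, if_pos hjs]
        simp [List.getD_eq_getElem?_getD, List.getElem?_set_ne hne]
      · rw [if_neg hjs]
        by_cases hw : w = (j : Int)
        · have hjadd : (j : Int) ∈ PySem.Set.add seen w := (PySem.Set.mem_add _ _ _).2 (Or.inr hw.symm)
          rw [if_pos hjadd]
          rw [pvFirst_cons, if_pos hw]
          have hwj : w.toNat = j := by omega
          rw [hwj]
          simp [List.getD_eq_getElem?_getD, hj]
        · have hjadd : (j : Int) ∉ PySem.Set.add seen w := by
            rw [PySem.Set.mem_add _ _ _]
            rintro (h | h)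
            · exact hjs h
            · exact hw h.symm
          rw [if_neg hjadd]
          rw [pvFirst_cons, if_neg hw]
          have hne : w.toNat ≠ j := by omega
          have hset : (tags.set w.toNat (PySem.Dict.getD ⟨id2l⟩ l "O")).getD j "O" = tags.getD j "O" := by
            simp [List.getD_eq_getElem?_getD, List.getElem?_set_ne hne]
          cases pvFirst rest j with
          | none => exact hset
          | some l' => rfl

theorem le_pvMaxWid (wids : List Int) (w : Int) (hw : w ∈ wids) (h0 : 0 ≤ w) : w ≤ pvMaxWid wids := by
  exact (PySem.List.le_foldl_max _ _).2 w (List.mem_filter.2 ⟨hw, by simpa using h0⟩)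

-- ===== VERDICT (by name: the statement is the Claim_ definition above) =====
theorem token_ids_to_word_tags_spec : Claim_equal_token_ids_to_word_tags := by
  intro tli wids id2l _
  unfold Spec_token_ids_to_word_tags token_ids_to_word_tags token_ids_to_word_tags_alt
  by_cases hm : pvMaxWid wids < 0
  · simp [hm]
  · simp only [if_neg hm]
    rw [List.foldl_reverse, pvLoopA_eq_pvFwd, List.drop_zero]
    set tags0 : List String := List.replicate (pvMaxWid wids + 1).toNat "O" with htags0
    have hlen0 : tags0.length = (pvMaxWid wids + 1).toNat := by simp [htags0]
    have hbound : ∀ p ∈ wids.zip tli, 0 ≤ p.1 → p.1 < (tags0.length : Int) := by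
      intro p hp h0
      have hmem : p.1 ∈ wids := (List.of_mem_zip hp).1
      have := le_pvMaxWid wids p.1 hmem h0
      rw [hlen0]; omega
    apply List.ext_getElem
    · rw [pvFwd_length, pvRun_length]
    · intro j h1 h2
      have hj : j < tags0.length := by rwa [pvFwd_length] at h1
      have hA := pvFwd_getD id2l (wids.zip tli) tags0 PySem.Set.empty j hj hbound
      have hB := pvRun_getD id2l (wids.zip tli) tags0 j hj
      rw [List.getD_eq_getElem _ "O" h1] at hA
      rw [List.getD_eq_getElem _ "O" h2] at hB
      rw [hA, hB]
      simp [PySem.Set.empty]
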